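-- pv_equiv track=rewrite | github.com/Yash2003Bisht/ProblemSolutions | solutions/codechef/LEPERMUT/LEPERMUT_1.py | is_good_permutation
-- ===== SOURCE A (Python) =====
-- def is_good_permutation(n, a):
--     inversions = 0
--     local_inversions = 0
--     for i in range(n):
--         for j in range(i+1, n):
--             if a[i] > a[j]:
--                 inversions += 1
--     for i in range(n-1):
--         if a[i] > a[i+1]:
--             local_inversions += 1
--     return inversions == local_inversions
-- ===== SOURCE B (Python) =====
-- def is_good_permutation(n, a):
--     # inversions == local inversions  <=>  there is no non-adjacent inversion,
--     # i.e. for every i >= 2, max(a[0..i-2]) <= a[i]: one pass with a running prefix max.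
--     prefix_max = None
--     for i in range(2, n):
--         prefix_max = a[i - 2] if prefix_max is None else max(prefix_max, a[i - 2])
--         if prefix_max > a[i]:
--             return False
--     return True
-- ===== Notes on version B (the rewrite author's own statement) =====
-- stated objective: faster
-- what changed: Replaced the O(n^2) pairwise inversion count and separate adjacent-inversion pass by a single O(n) scan with a running prefix maximum, using the fact that the two counts are equal iff no inversion spans a gap of at least 2, i.e. max(a[0..i-2]) <= a[i] for every i.
import Mathlib
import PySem

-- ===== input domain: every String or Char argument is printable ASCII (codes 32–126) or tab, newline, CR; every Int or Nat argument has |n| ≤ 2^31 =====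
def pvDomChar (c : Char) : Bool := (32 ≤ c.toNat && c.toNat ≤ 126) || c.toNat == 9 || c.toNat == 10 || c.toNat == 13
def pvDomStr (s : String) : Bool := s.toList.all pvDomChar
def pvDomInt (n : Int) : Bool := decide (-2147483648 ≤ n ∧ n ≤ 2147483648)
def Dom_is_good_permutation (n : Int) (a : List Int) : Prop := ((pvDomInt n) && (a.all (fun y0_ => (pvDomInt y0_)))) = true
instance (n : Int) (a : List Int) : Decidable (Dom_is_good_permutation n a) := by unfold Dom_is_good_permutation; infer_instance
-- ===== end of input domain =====

-- B replaces A's O(n^2) pairwise inversion count by one O(n) prefix-maximum scan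
-- (inversions = local inversions iff no inversion spans a gap ≥ 2).

-- ===== PORT A =====
def is_good_permutation (n : Int) (a : List Int) : Bool :=
  let inversions : Int := (PySem.List.pyRange 0 n 1).foldl
    (fun inv i => (PySem.List.pyRange (i + 1) n 1).foldl
      (fun inv j =>
        if PySem.List.pyGetD a i 0 > PySem.List.pyGetD a j 0 then inv + 1 else inv) inv) 0
  let local_inversions : Int := (PySem.List.pyRange 0 (n - 1) 1).foldl
    (fun loc i =>
      if PySem.List.pyGetD a i 0 > PySem.List.pyGetD a (i + 1) 0 then loc + 1 else loc) 0
  decide (inversions = local_inversions)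

-- ===== PORT B =====
def pvAltLoop (a : List Int) (pm : Option Int) : List Int → Bool
  | [] => true
  | i :: rest =>
    let m : Int := match pm with
      | none => PySem.List.pyGetD a (i - 2) 0
      | some p => max p (PySem.List.pyGetD a (i - 2) 0)
    if m > PySem.List.pyGetD a i 0 then false else pvAltLoop a (some m) rest

def is_good_permutation_alt (n : Int) (a : List Int) : Bool :=
  pvAltLoop a none (PySem.List.pyRange 2 n 1)

-- ===== PRECONDITION & SPEC =====
-- Pre_ excludes exactly the inputs where Python A raises IndexError: n ≥ 2 with fewer than n list elements.
def Pre_is_good_permutation (n : Int) (a : List Int) : Prop := 2 ≤ n → n ≤ (a.length : Int)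
instance (n : Int) (a : List Int) : Decidable (Pre_is_good_permutation n a) := by
  unfold Pre_is_good_permutation; infer_instance
def pvWitness_is_good_permutation : Int × List Int := (4, [1, 2, 4, 3])

def Spec_is_good_permutation (n : Int) (a : List Int) (out : Bool) : Prop := out = is_good_permutation_alt n a
instance (n : Int) (a : List Int) (out : Bool) : Decidable (Spec_is_good_permutation n a out) := by unfold Spec_is_good_permutation; infer_instance

-- ===== CLAIM (what is proved, stated in full; the proofs are below) =====
def Claim_equal_is_good_permutation : Prop := ∀ (n : Int) (a : List Int), Dom_is_good_permutation n a → Pre_is_good_permutation n a → Spec_is_good_permutation n a (is_good_permutation n a)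

-- ===== LEMMAS AND PROOFS =====

-- element access shared by both characterizations
def pvE (a : List Int) (t : Int) : Int := PySem.List.pyGetD a t 0

-- "no non-adjacent inversion whose right index is ≥ i"
def pvGood (n : Int) (a : List Int) (i : Int) : Prop :=
  ∀ p q : Int, 0 ≤ p → p + 2 ≤ q → i ≤ q → q < n → pvE a p ≤ pvE a q

-- v is the maximum of a[0..k]
def pvIsMax (a : List Int) (v k : Int) : Prop :=
  (∀ t : Int, 0 ≤ t → t ≤ k → pvE a t ≤ v) ∧ (∃ t : Int, 0 ≤ t ∧ t ≤ k ∧ pvE a t = v)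

lemma pvIsMax_step (a : List Int) (v k : Int) (h : pvIsMax a v k) :
    pvIsMax a (max v (pvE a (k + 1))) (k + 1) := by
  obtain ⟨hub, t, ht0, htk, htv⟩ := h
  constructor
  · intro t ht0' htk'
    rcases lt_or_ge t (k + 1) with h' | h'
    · exact le_trans (hub t ht0' (by omega)) (le_max_left _ _)
    · have : t = k + 1 := by omega
      subst this; exact le_max_right _ _
  · rcases le_total v (pvE a (k + 1)) with h' | h'
    · exact ⟨k + 1, by omega, le_refl _, by simp [max_eq_right h']⟩
    · exact ⟨t, ht0, by omega, by simp [htv, max_eq_left h']⟩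

lemma pvStep (n : Int) (a : List Int) (i m : Int) (hin : i < n)
    (hm : pvIsMax a m (i - 2))
    (hrec : pvAltLoop a (some m) (PySem.List.pyRange (i + 1) n 1) = true ↔ pvGood n a (i + 1)) :
    ((if m > PySem.List.pyGetD a i 0 then false
      else pvAltLoop a (some m) (PySem.List.pyRange (i + 1) n 1)) = true ↔ pvGood n a i) := by
  split_ifs with hcmp
  · simp only [false_iff]
    intro hg
    obtain ⟨t, ht0, htk, htv⟩ := hm.2
    have := hg t i ht0 (by omega) (le_refl i) hin
    rw [htv] at this
    exact absurd hcmp (not_lt.mpr this)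
  · rw [hrec]
    push Not at hcmp
    constructor
    · intro hg p q hp hpq hiq hqn
      rcases eq_or_lt_of_le hiq with hq | hq
      · subst hq
        exact le_trans (hm.1 p hp (by omega)) hcmp
      · exact hg p q hp hpq (by omega) hqn
    · intro hg p q hp hpq hiq hqn
      exact hg p q hp hpq (by omega) hqn

lemma pvAltLoop_iff (n : Int) (a : List Int) :
    ∀ (c : Nat) (i : Int) (pm : Option Int), 2 ≤ i → n - i ≤ (c : Int) →
    ((pm = none ∧ i = 2) ∨ (∃ v, pm = some v ∧ pvIsMax a v (i - 3))) →
    (pvAltLoop a pm (PySem.List.pyRange i n 1) = true ↔ pvGood n a i) := by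
  intro c
  induction c with
  | zero =>
    intro i pm h2 hc _
    rw [PySem.List.pyRange_one_eq_nil (by omega : n ≤ i)]
    simp only [pvAltLoop, true_iff]
    intro p q _ _ _ _; omega
  | succ c ih =>
    intro i pm h2 hc hinv
    rcases lt_or_ge i n with hin | hni
    case inr =>
      rw [PySem.List.pyRange_one_eq_nil hni]
      simp only [pvAltLoop, true_iff]
      intro p q _ _ _ _; omega
    rw [PySem.List.pyRange_one_cons hin]
    rcases hinv with ⟨hnone, hi2⟩ | ⟨v, hsome, hv⟩
    · subst hnone; subst hi2
      simp only [pvAltLoop]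
      refine pvStep n a 2 _ hin ?_ (ih 3 _ (by omega) (by omega)
        (Or.inr ⟨_, rfl, ?_⟩))
      · refine ⟨?_, 0, by omega, by omega, rfl⟩
        intro t ht0 htk
        have : t = 0 := by omega
        subst this; exact le_refl _
      · refine ⟨?_, 0, by omega, by omega, rfl⟩
        intro t ht0 htk
        have : t = 0 := by omega
        subst this; exact le_refl _
    · subst hsome
      simp only [pvAltLoop]
      have hm : pvIsMax a (max v (PySem.List.pyGetD a (i - 2) 0)) (i - 2) := by
        have := pvIsMax_step a v (i - 3) hv
        simpa [show i - 3 + 1 = i - 2 by ring] using this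
      exact pvStep n a i _ hin hm (ih (i + 1) _ (by omega) (by omega)
        (Or.inr ⟨_, rfl, by simpa [show i + 1 - 3 = i - 2 by ring] using hm⟩))

lemma pvSumMapCast (l : List Int) (f : Int → Nat) :
    (l.map fun i => ((f i : Nat) : Int)).sum = (((l.map f).sum : Nat) : Int) := by
  rw [Nat.cast_list_sum, List.map_map]; rfl

def pvC2 (n : Int) (a : List Int) (i : Int) : Nat :=
  (PySem.List.pyRange (i + 2) n 1).countP
    (fun j => decide (PySem.List.pyGetD a i 0 > PySem.List.pyGetD a j 0))

def pvBit (a : List Int) (i : Int) : Nat :=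
  if decide (PySem.List.pyGetD a i 0 > PySem.List.pyGetD a (i + 1) 0) then 1 else 0

lemma pvA_iff (n : Int) (a : List Int) :
    is_good_permutation n a = true ↔ pvGood n a 2 := by
  unfold is_good_permutation
  simp only [PySem.List.foldl_ite_add_one]
  rw [PySem.List.foldl_add]
  simp only [zero_add, decide_eq_true_eq]
  rcases lt_or_ge (0:Int) n with hn | hn
  case inr =>
    rw [PySem.List.pyRange_one_eq_nil hn, PySem.List.pyRange_one_eq_nil (by omega : n - 1 ≤ 0)]
    simp only [List.map_nil, List.sum_nil, List.countP_nil, Nat.cast_zero, true_iff]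
    intro p q _ _ _ hqn; omega
  -- split off the last outer index n-1, whose inner range is empty
  have hsplit : PySem.List.pyRange 0 n 1
      = PySem.List.pyRange 0 (n - 1) 1 ++ [n - 1] := by
    have h := PySem.List.pyRange_one_succ_right (a := 0) (b := n - 1) (by omega)
    rw [show n - 1 + 1 = n by ring] at h
    exact h
  rw [hsplit, List.map_append, List.sum_append]
  simp only [List.map_cons, List.map_nil, List.sum_cons, List.sum_nil, add_zero]
  rw [show n - 1 + 1 = n by ring, PySem.List.pyRange_one_eq_nil (le_refl n)]
  simp only [List.countP_nil, Nat.cast_zero, add_zero]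
  -- decompose each inner count: tail pairs (distance ≥ 2) + the adjacent pair
  have hmap : (PySem.List.pyRange 0 (n - 1) 1).map
      (fun i => (((PySem.List.pyRange (i + 1) n 1).countP
        (fun j => decide (PySem.List.pyGetD a i 0 > PySem.List.pyGetD a j 0)) : Nat) : Int))
      = (PySem.List.pyRange 0 (n - 1) 1).map
      (fun i => ((pvC2 n a i + pvBit a i : Nat) : Int)) := by
    apply List.map_congr_left
    intro i hi
    rw [PySem.List.mem_pyRange_one] at hi
    rw [PySem.List.pyRange_one_cons (by omega : i + 1 < n), List.countP_cons,
        show i + 1 + 1 = i + 2 by ring]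
    rfl
  rw [hmap, pvSumMapCast _ (fun i => pvC2 n a i + pvBit a i), Nat.cast_inj, List.sum_map_add]
  have hbit : ((PySem.List.pyRange 0 (n - 1) 1).map (fun i => pvBit a i)).sum
      = (PySem.List.pyRange 0 (n - 1) 1).countP
        (fun i => decide (PySem.List.pyGetD a i 0 > PySem.List.pyGetD a (i + 1) 0)) := by
    simp only [pvBit]
    exact PySem.List.sum_map_ite_one_zero_nat _ _
  rw [hbit]
  have hcancel : ∀ S L : Nat, S + L = L ↔ S = 0 := fun S L => by omega
  rw [hcancel, List.sum_eq_zero_iff_forall_eq_nat, List.forall_mem_map]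
  constructor
  · intro h p q hp hpq h2q hqn
    have hc := h p (PySem.List.mem_pyRange_one.mpr ⟨hp, by omega⟩)
    rw [pvC2, List.countP_eq_zero] at hc
    have := hc q (PySem.List.mem_pyRange_one.mpr ⟨by omega, hqn⟩)
    simp only [decide_eq_true_eq] at this
    exact not_lt.mp this
  · intro h i hi
    rw [PySem.List.mem_pyRange_one] at hi
    rw [pvC2, List.countP_eq_zero]
    intro j hj
    rw [PySem.List.mem_pyRange_one] at hj
    simp only [decide_eq_true_eq]
    exact not_lt.mpr (h i j hi.1 (by omega) (by omega) hj.2)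

lemma pvB_iff (n : Int) (a : List Int) :
    is_good_permutation_alt n a = true ↔ pvGood n a 2 := by
  unfold is_good_permutation_alt
  exact pvAltLoop_iff n a (n - 2).toNat 2 none (by omega) (by omega) (Or.inl ⟨rfl, rfl⟩)

-- ===== VERDICT (by name: the statement is the Claim_ definition above) =====
theorem is_good_permutation_spec : Claim_equal_is_good_permutation := by
  intro n a _ _
  unfold Spec_is_good_permutation
  have := (pvA_iff n a).trans (pvB_iff n a).symm
  rcases hA : is_good_permutation n a with _ | _ <;>
    rcases hB : is_good_permutation_alt n a with _ | _ <;> simp_all
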